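-- pv_equiv track=rewrite | github.com/artvepa80/OMEGA | core/consensus_engine.py | _identify_rare_numbers
-- ===== SOURCE A (Python) =====
-- from typing import List, Dict, Any
--
-- EXPLORATORY_CONFIG = {
--     "rare_number_threshold": 0.25,  # Bottom 25% frequency = rare
--     "anomaly_score_weight": 0.20,   # Weight for anomaly score in final ranking
--     "diversity_bonus_cap": 0.35,    # Maximum diversity bonus
--     "edge_case_boost": 0.25,        # Boost for edge case combinations
--     "exploration_decay": 0.95,      # Decay factor for exploration over time
--     "min_rare_numbers": 2,          # Minimum rare numbers for bonus
--     "historical_lookback": 100,     # Number of historical draws to analyze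
-- }
--
-- def _identify_rare_numbers(historical_numbers: List[int]) -> set:
--     """Identify rare numbers based on historical frequency."""
--     if not historical_numbers:
--         return set()
--
--     from collections import Counter
--     frequency = Counter(historical_numbers)
--     sorted_numbers = sorted(frequency.items(), key=lambda x: x[1])
--
--     threshold = EXPLORATORY_CONFIG["rare_number_threshold"]
--     rare_count = max(1, int(len(sorted_numbers) * threshold))
--
--     return {num for num, _ in sorted_numbers[:rare_count]}
-- ===== SOURCE B (Python) =====
-- def _identify_rare_numbers(historical_numbers):
--     """Selection over the distinct-frequency set: repeatedly extract the minimum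
--     frequency and sweep the counts for its numbers until the quota is filled (no sort)."""
--     if not historical_numbers:
--         return set()
--     from collections import Counter
--     frequency = Counter(historical_numbers)
--     rare_count = max(1, len(frequency) // 4)
--     freqs = set(frequency.values())
--     rare = set()
--     while len(rare) < rare_count:
--         f = min(freqs)
--         freqs.discard(f)
--         for num, c in frequency.items():
--             if c == f and len(rare) < rare_count:
--                 rare.add(num)
--     return rare
-- ===== Notes on version B (the rewrite author's own statement) =====
-- stated objective: alternative
-- what changed: No sort at all: B repeatedly extracts the minimum of the set of distinct frequency values and sweeps the Counter items for numbers of that frequency until the rare_count quota is filled (a partial selection over the frequency histogram), where A stably sorts all items by frequency and takes a prefix.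
import Mathlib
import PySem

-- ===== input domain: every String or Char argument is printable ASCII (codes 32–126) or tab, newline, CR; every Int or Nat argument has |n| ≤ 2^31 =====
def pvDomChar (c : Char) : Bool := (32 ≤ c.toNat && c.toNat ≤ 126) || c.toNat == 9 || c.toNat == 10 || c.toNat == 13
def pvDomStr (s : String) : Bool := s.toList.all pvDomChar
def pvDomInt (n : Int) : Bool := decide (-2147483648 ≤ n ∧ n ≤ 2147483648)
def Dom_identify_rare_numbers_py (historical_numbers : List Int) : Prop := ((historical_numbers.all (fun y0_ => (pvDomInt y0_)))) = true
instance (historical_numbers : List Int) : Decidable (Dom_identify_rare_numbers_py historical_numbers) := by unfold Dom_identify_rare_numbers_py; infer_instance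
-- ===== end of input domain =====

-- B never sorts: it repeatedly extracts the minimum of the set of distinct frequency values and
-- sweeps the Counter items for numbers of that frequency until the quota is filled (a partial
-- selection over the frequency histogram); objective: alternative.

-- ===== PORT A =====
-- int(len(sorted_numbers) * 0.25): exact as len // 4, since 0.25 = 2^-2 and the length (a Python
-- list length, far below 2^53) times 0.25 is an exact binary float whose int() is the floor.
def identify_rare_numbers_py (historical_numbers : List Int) : List Int :=
  if historical_numbers.isEmpty then []
  else
    let frequency := PySem.Dict.counter historical_numbers
    let sorted_numbers := PySem.List.sorted frequency.items (fun x => x.2) false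
    let rare_count : Int := max 1 ((sorted_numbers.length / 4 : Nat) : Int)
    PySem.Set.ofList ((PySem.List.slice sorted_numbers none (some rare_count)).map (fun p => p.1))

-- ===== PORT B =====
-- the 'while len(rare) < rare_count' loop: f = min(freqs); freqs.discard(f); then the inner
-- 'for num, c in frequency.items()' sweep.  min on an empty set raises ValueError; that is
-- unreachable (the quota is at most the total number of items) and is totalized by returning
-- the accumulator; the fuel is the number of distinct frequencies, which the loop can never
-- exceed since each pass discards one of them.
def pvSelFreqLoop (fuel : Nat) (freqs : PySem.Set Int) (items : List (Int × Int))
    (rare_count : Int) (rare : PySem.Set Int) : PySem.Set Int :=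
  match fuel with
  | 0 => rare
  | Nat.succ n =>
    if (rare.length : Int) < rare_count then
      match PySem.List.min? freqs (fun x => x) with
      | none => rare
      | some f =>
          pvSelFreqLoop n (PySem.Set.discard freqs f) items rare_count
            (items.foldl
              (fun r p =>
                if p.2 == f && decide ((r.length : Int) < rare_count)
                then PySem.Set.add r p.1 else r) rare)
    else rare

-- max(1, len(frequency) // 4)
def identify_rare_numbers_py_alt (historical_numbers : List Int) : List Int :=
  if historical_numbers.isEmpty then []
  else
    let frequency := PySem.Dict.counter historical_numbers
    let rare_count : Int := max 1 ((frequency.keys.length / 4 : Nat) : Int)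
    let freqs := PySem.Set.ofList frequency.values
    pvSelFreqLoop freqs.length freqs frequency.items rare_count PySem.Set.empty

-- ===== PRECONDITION & SPEC =====
def Spec_identify_rare_numbers_py (historical_numbers : List Int) (out : List Int) : Prop := out = identify_rare_numbers_py_alt historical_numbers
instance (historical_numbers : List Int) (out : List Int) : Decidable (Spec_identify_rare_numbers_py historical_numbers out) := by unfold Spec_identify_rare_numbers_py; infer_instance

-- ===== CLAIM (what is proved, stated in full; the proofs are below) =====
def Claim_equal_identify_rare_numbers_py : Prop := ∀ (historical_numbers : List Int), Dom_identify_rare_numbers_py historical_numbers → Spec_identify_rare_numbers_py historical_numbers (identify_rare_numbers_py historical_numbers)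

-- ===== LEMMAS AND PROOFS =====

-- insertBy walks past a prefix none of whose elements trigger `before`.
theorem insertBy_append_of_forall_not_before {α : Type} (before : α → α → Bool) (x : α)
    (ys zs : List α) (h : ∀ y ∈ ys, before x y = false) :
    PySem.List.insertBy before x (ys ++ zs) = ys ++ PySem.List.insertBy before x zs := by
  induction ys with
  | nil => simp
  | cons y t ih =>
      have hy : before x y = false := h y (by simp)
      simp [PySem.List.insertBy, hy, ih (fun z hz => h z (by simp [hz]))]

-- insertBy puts x in front when already the head triggers `before` (or the list is empty).
theorem insertBy_eq_cons_of_forall_before {α : Type} (before : α → α → Bool) (x : α)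
    (ys : List α) (h : ∀ y ∈ ys, before x y = true) :
    PySem.List.insertBy before x ys = x :: ys := by
  cases ys with
  | nil => rfl
  | cons y t => simp [PySem.List.insertBy, h y (by simp)]

-- inserting x into the concatenated groups when its key already owns a group:
-- x lands at the end of its own group.
theorem insertBy_flatMap_mem (K : List Int) (x : Int × Int) (g : Int → List (Int × Int))
    (hK : K.Pairwise (· < ·)) (hg : ∀ f ∈ K, ∀ p ∈ g f, p.2 = f) (hk : x.2 ∈ K) :
    PySem.List.insertBy (fun a b => decide (a.2 < b.2)) x (K.flatMap g)
      = K.flatMap (fun f => g f ++ if x.2 == f then [x] else []) := by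
  induction K with
  | nil => cases hk
  | cons f K' ihK =>
      rw [List.pairwise_cons] at hK
      rw [List.flatMap_cons, List.flatMap_cons]
      by_cases hfk : x.2 = f
      · have h1 : ∀ p ∈ g f, (decide (x.2 < p.2)) = false := by
          intro p hp
          rw [hg f (by simp) p hp, hfk]
          simp
        have h2 : ∀ p ∈ K'.flatMap g, (decide (x.2 < p.2)) = true := by
          intro p hp
          rcases List.mem_flatMap.mp hp with ⟨f', hf', hpf'⟩
          rw [hg f' (by simp [hf']) p hpf', hfk]
          simpa using hK.1 f' hf'
        rw [insertBy_append_of_forall_not_before _ _ _ _ h1,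
            insertBy_eq_cons_of_forall_before _ _ _ h2]
        have hcongr : K'.flatMap (fun f' => g f' ++ if x.2 == f' then [x] else [])
            = K'.flatMap g := by
          refine List.flatMap_congr ?_
          intro f' hf'
          have : (x.2 == f') = false := by
            have := hK.1 f' hf'
            rw [hfk]
            simp only [beq_eq_false_iff_ne]
            omega
          simp [this]
        rw [hcongr, hfk]
        simp
      · have hk' : x.2 ∈ K' := by
          rcases hk with _ | h
          · exact absurd rfl hfk
          · assumption
        have hflt : f < x.2 := hK.1 _ hk'
        have h1 : ∀ p ∈ g f, (decide (x.2 < p.2)) = false := by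
          intro p hp
          rw [hg f (by simp) p hp]
          simp only [decide_eq_false_iff_not]
          omega
        rw [insertBy_append_of_forall_not_before _ _ _ _ h1,
            ihK hK.2 (fun f' hf' => hg f' (by simp [hf'])) hk']
        have : (x.2 == f) = false := by
          simp only [beq_eq_false_iff_ne]
          omega
        simp [this]

-- inserting x into the concatenated groups when its key is new: a fresh singleton group
-- appears exactly where the key sorts.
theorem insertBy_flatMap_not_mem (K : List Int) (x : Int × Int) (g : Int → List (Int × Int))
    (hK : K.Pairwise (· < ·)) (hg : ∀ f ∈ K, ∀ p ∈ g f, p.2 = f) (hk : x.2 ∉ K) :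
    PySem.List.insertBy (fun a b => decide (a.2 < b.2)) x (K.flatMap g)
      = (PySem.List.insertBy (fun a b => decide (a < b)) x.2 K).flatMap
          (fun f => if f = x.2 then [x] else g f) := by
  induction K with
  | nil => simp [PySem.List.insertBy]
  | cons f K' ihK =>
      rw [List.pairwise_cons] at hK
      have hfk : f ≠ x.2 := fun h => hk (h ▸ List.mem_cons_self ..)
      by_cases hlt : x.2 < f
      · have h2 : ∀ p ∈ (f :: K').flatMap g, (decide (x.2 < p.2)) = true := by
          intro p hp
          rcases List.mem_flatMap.mp hp with ⟨f', hf', hpf'⟩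
          have hpf := hg f' hf' p hpf'
          rcases List.mem_cons.mp hf' with rfl | hf2
          · rw [hpf]
            simpa using hlt
          · rw [hpf]
            have := hK.1 f' hf2
            simp only [decide_eq_true_eq]
            omega
        rw [insertBy_eq_cons_of_forall_before _ _ _ h2]
        have hins : PySem.List.insertBy (fun a b => decide (a < b)) x.2 (f :: K')
            = x.2 :: f :: K' := by
          simp [PySem.List.insertBy, hlt]
        rw [hins, List.flatMap_cons]
        have hcongr : (f :: K').flatMap (fun f' => if f' = x.2 then [x] else g f')
            = (f :: K').flatMap g := by
          refine List.flatMap_congr ?_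
          intro f' hf'
          have : f' ≠ x.2 := fun h => hk (h ▸ hf')
          simp [this]
        simp [hcongr]
      · have hflt : f < x.2 := lt_of_le_of_ne (not_lt.mp hlt) hfk
        have h1 : ∀ p ∈ g f, (decide (x.2 < p.2)) = false := by
          intro p hp
          rw [hg f (by simp) p hp]
          simp only [decide_eq_false_iff_not]
          omega
        have hins : PySem.List.insertBy (fun a b => decide (a < b)) x.2 (f :: K')
            = f :: PySem.List.insertBy (fun a b => decide (a < b)) x.2 K' := by
          simp [PySem.List.insertBy, not_lt.mpr (le_of_lt hflt)]
        rw [List.flatMap_cons,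
            insertBy_append_of_forall_not_before _ _ _ _ h1,
            ihK hK.2 (fun f' hf' => hg f' (by simp [hf'])) (fun h => hk (List.mem_cons_of_mem _ h)),
            hins, List.flatMap_cons]
        simp [hfk]

-- STABILITY: Python's stable sort by the second component equals the concatenation, in
-- ascending key order, of the first-appearance-ordered groups of equal keys.
theorem sorted_snd_eq_flatMap_groups (l : List (Int × Int)) :
    PySem.List.sorted l (fun p => p.2) false
      = (PySem.List.sorted (PySem.Set.ofList (l.map (fun p => p.2))) (fun k => k) false).flatMap
          (fun f => l.filter (fun p => p.2 == f)) := by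
  induction l using List.reverseRecOn with
  | nil => rfl
  | append_singleton l x ih =>
      have hsorted : PySem.List.sorted (l ++ [x]) (fun p => p.2) false
          = PySem.List.insertBy (fun a b => decide (a.2 < b.2)) x
              (PySem.List.sorted l (fun p => p.2) false) := by
        rw [PySem.List.sorted_eq_foldl_insertBy, PySem.List.sorted_eq_foldl_insertBy,
            List.foldl_append, List.foldl_cons, List.foldl_nil]
      have hKpair : (PySem.List.sorted (PySem.Set.ofList (l.map (fun p => p.2)))
          (fun k => k) false).Pairwise (· < ·) := PySem.List.sorted_ofList_pairwise_lt _
      have hg : ∀ f ∈ (PySem.List.sorted (PySem.Set.ofList (l.map (fun p => p.2)))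
          (fun k => k) false), ∀ p ∈ l.filter (fun p => p.2 == f), p.2 = f := by
        intro f _ p hp
        exact beq_iff_eq.mp (List.mem_filter.mp hp).2
      have hofl : PySem.Set.ofList ((l ++ [x]).map (fun p => p.2))
          = PySem.Set.add (PySem.Set.ofList (l.map (fun p => p.2))) x.2 := by
        rw [List.map_append, PySem.Set.ofList_eq_foldl, PySem.Set.ofList_eq_foldl,
            List.foldl_append, List.map_cons, List.map_nil, List.foldl_cons, List.foldl_nil]
      by_cases hmem : x.2 ∈ PySem.Set.ofList (l.map (fun p => p.2))
      · have hadd : PySem.Set.add (PySem.Set.ofList (l.map (fun p => p.2))) x.2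
            = PySem.Set.ofList (l.map (fun p => p.2)) := by
          have : (PySem.Set.ofList (l.map (fun p => p.2))).contains x.2 = true := by
            exact List.contains_iff_mem.mpr hmem
          simp only [PySem.Set.add, this]
          simp
        rw [hsorted, ih, hofl, hadd,
            insertBy_flatMap_mem _ x _ hKpair hg
              ((PySem.List.mem_sorted _ _ _ _).mpr hmem)]
        refine (List.flatMap_congr ?_).symm
        intro f _
        rw [List.filter_append]
        rcases h : (x.2 == f) with _ | _ <;> simp [h]
      · have hadd : PySem.Set.add (PySem.Set.ofList (l.map (fun p => p.2))) x.2
            = PySem.Set.ofList (l.map (fun p => p.2)) ++ [x.2] := by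
          have : (PySem.Set.ofList (l.map (fun p => p.2))).contains x.2 = false := by
            exact Bool.eq_false_iff.mpr (fun h => hmem (List.contains_iff_mem.mp h))
          simp only [PySem.Set.add, this]
          simp
        have hKins : PySem.List.sorted (PySem.Set.ofList (l.map (fun p => p.2)) ++ [x.2])
            (fun k => k) false
            = PySem.List.insertBy (fun a b => decide (a < b)) x.2
                (PySem.List.sorted (PySem.Set.ofList (l.map (fun p => p.2))) (fun k => k) false) := by
          rw [PySem.List.sorted_eq_foldl_insertBy, PySem.List.sorted_eq_foldl_insertBy,
              List.foldl_append, List.foldl_cons, List.foldl_nil]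
        have hknot : x.2 ∉ PySem.List.sorted (PySem.Set.ofList (l.map (fun p => p.2)))
            (fun k => k) false := fun h => hmem ((PySem.List.mem_sorted _ _ _ _).mp h)
        have hempty : l.filter (fun p => p.2 == x.2) = [] := by
          rw [List.filter_eq_nil_iff]
          intro p hp
          simp only [beq_eq_false_iff_ne, ne_eq, Bool.not_eq_true]
          intro hpx
          exact hmem ((PySem.Set.mem_ofList _ _).mpr
            (List.mem_map.mpr ⟨p, hp, hpx⟩))
        rw [hsorted, ih, hofl, hadd, hKins,
            insertBy_flatMap_not_mem _ x _ hKpair hg hknot]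
        refine List.flatMap_congr ?_
        intro f _
        by_cases hf : f = x.2
        · subst hf
          simp [List.filter_append, hempty]
        · have : (x.2 == f) = false := beq_eq_false_iff_ne.mpr (Ne.symm hf)
          simp [List.filter_append, hf, this]

-- appending one element to the input of the insertion sort = one insertBy step on its output
theorem sorted_id_append_singleton (l : List Int) (x : Int) :
    PySem.List.sorted (l ++ [x]) (fun k => k) false
      = PySem.List.insertBy (fun a b => decide (a < b)) x
          (PySem.List.sorted l (fun k => k) false) := by
  rw [PySem.List.sorted_eq_foldl_insertBy, PySem.List.sorted_eq_foldl_insertBy,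
      List.foldl_append, List.foldl_cons, List.foldl_nil]

-- one more element moves Python's first-minimum by one fold step
theorem min?_id_append_singleton (l : List Int) (x m : Int)
    (h : PySem.List.min? l (fun k => k) = some m) :
    PySem.List.min? (l ++ [x]) (fun k => k)
      = some (if x < m then x else m) := by
  simp only [PySem.List.min?] at h ⊢
  rw [List.foldl_append, h, List.foldl_cons, List.foldl_nil]
  split_ifs <;> simp_all

-- the sorted list of values is "the first minimum, then the sorted rest with it erased"
theorem sorted_id_eq_min_cons (l : List Int) (m : Int)
    (h : PySem.List.min? l (fun k => k) = some m) :
    PySem.List.sorted l (fun k => k) false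
      = m :: PySem.List.sorted (l.erase m) (fun k => k) false := by
  induction l using List.reverseRecOn generalizing m with
  | nil => simp [PySem.List.min?] at h
  | append_singleton l x ih =>
      cases hl : PySem.List.min? l (fun k => k) with
      | none =>
          have : l = [] := (PySem.List.min?_eq_none_iff _ _).mp hl
          subst this
          simp only [List.nil_append, PySem.List.min?, List.foldl_cons, List.foldl_nil] at h
          cases h
          simp [PySem.List.sorted, PySem.List.insertBy]
      | some m0 =>
          have hx := min?_id_append_singleton l x m0 hl
          rw [h] at hx
          by_cases hlt : x < m0
          · have hm : m = x := by rw [if_pos hlt] at hx; exact Option.some_inj.mp hx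
            subst hm
            have hnot : m ∉ l := fun hmem =>
              absurd (PySem.List.min?_isMin hl m hmem) (not_le.mpr hlt)
            have he : (l ++ [m]).erase m = l := by
              rw [List.erase_append_right _ hnot]; simp
            rw [sorted_id_append_singleton, he, ih m0 hl]
            simp [PySem.List.insertBy, hlt]
          · have hm : m = m0 := by rw [if_neg hlt] at hx; exact Option.some_inj.mp hx
            subst hm
            have hmem : m ∈ l := PySem.List.min?_mem hl
            have he : (l ++ [x]).erase m = l.erase m ++ [x] := List.erase_append_left _ hmem
            rw [sorted_id_append_singleton, ih m hl, he, sorted_id_append_singleton]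
            simp [PySem.List.insertBy, hlt]

-- folding Set.add over a list disjoint from the accumulator just appends it
theorem foldl_add_of_nodup (xs acc : List Int) (h : (acc ++ xs).Nodup) :
    xs.foldl PySem.Set.add acc = acc ++ xs := by
  induction xs generalizing acc with
  | nil => simp
  | cons x t ih =>
      have hx : x ∉ acc := by
        intro hmem
        rcases List.nodup_append.mp h with ⟨-, -, hdisj⟩
        exact hdisj x hmem x (List.mem_cons_self ..) rfl
      rw [List.foldl_cons]
      show List.foldl PySem.Set.add (PySem.Set.add acc x) t = acc ++ x :: t
      rw [show PySem.Set.add acc x = acc ++ [x] by simp [PySem.Set.add, hx]]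
      rw [ih (acc ++ [x]) (by simpa using h)]
      simp

-- set(xs) of an already-duplicate-free list is the list itself
theorem ofList_eq_self_of_nodup (xs : List Int) (h : xs.Nodup) :
    PySem.Set.ofList xs = xs := by
  rw [PySem.Set.ofList_eq_foldl]
  exact foldl_add_of_nodup xs [] (by simpa using h)

-- once the quota is reached, the sweep changes nothing
theorem sweep_full (f : Int) (rcN : Nat) (its : List (Int × Int)) (rare : List Int)
    (h : rcN ≤ rare.length) :
    its.foldl
      (fun r p =>
        if p.2 == f && decide ((r.length : Int) < ((rcN : Nat) : Int))
        then PySem.Set.add r p.1 else r) rare = rare := by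
  induction its with
  | nil => rfl
  | cons p t ih =>
      have hdec : (decide ((rare.length : Int) < ((rcN : Nat) : Int))) = false := by
        simp only [decide_eq_false_iff_not, not_lt]
        exact_mod_cast h
      rw [List.foldl_cons]
      simp only [hdec, Bool.and_false, Bool.false_eq_true, if_false]
      exact ih

-- the inner sweep appends, in first-appearance order, the numbers of frequency f
-- up to the remaining quota
theorem sweep_eq (f : Int) (rcN : Nat) (its : List (Int × Int)) (rare : List Int)
    (hnd : ((its.filter (fun p => p.2 == f)).map (fun p => p.1)).Nodup)
    (hdisj : ∀ p ∈ its, p.2 = f → p.1 ∉ rare) :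
    its.foldl
      (fun r p =>
        if p.2 == f && decide ((r.length : Int) < ((rcN : Nat) : Int))
        then PySem.Set.add r p.1 else r) rare
      = rare ++ ((its.filter (fun p => p.2 == f)).map (fun p => p.1)).take (rcN - rare.length) := by
  induction its generalizing rare with
  | nil => simp
  | cons p t ih =>
      by_cases hpf : p.2 = f
      · have hb : (p.2 == f) = true := beq_iff_eq.mpr hpf
        by_cases hlen : rare.length < rcN
        · have hdec : (decide ((rare.length : Int) < ((rcN : Nat) : Int))) = true := by
            simp only [decide_eq_true_eq]
            exact_mod_cast hlen
          have hnotin : p.1 ∉ rare := hdisj p (List.mem_cons_self ..) hpf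
          have hc : rare.contains p.1 = false :=
            Bool.eq_false_iff.mpr (fun hbm => hnotin (List.contains_iff_mem.mp hbm))
          have hadd : PySem.Set.add rare p.1 = rare ++ [p.1] := by
            simp [PySem.Set.add, hnotin]
          have hcons : ((p :: t).filter (fun q => q.2 == f)).map (fun q => q.1)
              = p.1 :: (t.filter (fun q => q.2 == f)).map (fun q => q.1) := by
            rw [List.filter_cons, if_pos hb, List.map_cons]
          rw [hcons] at hnd
          have hndt : ((t.filter (fun q => q.2 == f)).map (fun q => q.1)).Nodup :=
            (List.nodup_cons.mp hnd).2
          have hhd : p.1 ∉ (t.filter (fun q => q.2 == f)).map (fun q => q.1) :=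
            (List.nodup_cons.mp hnd).1
          have hdisjt : ∀ q ∈ t, q.2 = f → q.1 ∉ rare ++ [p.1] := by
            intro q hq hqf
            simp only [List.mem_append, List.mem_singleton]
            rintro (hin | hq1)
            · exact hdisj q (List.mem_cons_of_mem _ hq) hqf hin
            · exact hhd (hq1 ▸ List.mem_map.mpr
                ⟨q, List.mem_filter.mpr ⟨hq, beq_iff_eq.mpr hqf⟩, rfl⟩)
          rw [List.foldl_cons]
          simp only [hb, hdec, Bool.and_self, if_true, hadd]
          rw [ih (rare ++ [p.1]) hndt hdisjt, hcons]
          have htake : (rcN - rare.length)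
              = (rcN - (rare ++ [p.1]).length) + 1 := by
            simp only [List.length_append, List.length_cons, List.length_nil]
            omega
          rw [htake, List.take_succ_cons]
          simp
        · have hdec : (decide ((rare.length : Int) < ((rcN : Nat) : Int))) = false := by
            simp only [decide_eq_false_iff_not, not_lt]
            exact_mod_cast not_lt.mp hlen
          rw [List.foldl_cons]
          simp only [hb, hdec, Bool.and_false, Bool.false_eq_true, if_false]
          rw [sweep_full f rcN t rare (not_lt.mp hlen)]
          have : rcN - rare.length = 0 := by omega
          simp [this]
      · have hb : (p.2 == f) = false := beq_eq_false_iff_ne.mpr hpf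
        rw [List.foldl_cons]
        simp only [hb, Bool.false_and, Bool.false_eq_true, if_false]
        rw [ih rare (by rw [List.filter_cons, if_neg (by simp [hb])] at hnd; exact hnd)
            (fun q hq hqf => hdisj q (List.mem_cons_of_mem _ hq) hqf)]
        simp [hb]

-- distinct firsts: two items sharing a first component are the same item
theorem firsts_inj (its : List (Int × Int)) (hnd : (its.map (fun p => p.1)).Nodup)
    {p q : Int × Int} (hp : p ∈ its) (hq : q ∈ its) (h1 : p.1 = q.1) : p = q :=
  List.inj_on_of_nodup_map hnd hp hq h1

-- unfolding equations of the while-loop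
theorem pvSelFreqLoop_stop (n : Nat) (fs : PySem.Set Int) (its : List (Int × Int))
    (rc : Int) (rare : PySem.Set Int) (h : ¬ ((rare.length : Int) < rc)) :
    pvSelFreqLoop (n + 1) fs its rc rare = rare := by
  simp [pvSelFreqLoop, h]

theorem pvSelFreqLoop_step (n : Nat) (fs : PySem.Set Int) (its : List (Int × Int))
    (rc : Int) (rare : PySem.Set Int) (f : Int) (h : (rare.length : Int) < rc)
    (hm : PySem.List.min? fs (fun x => x) = some f) :
    pvSelFreqLoop (n + 1) fs its rc rare
      = pvSelFreqLoop n (PySem.Set.discard fs f) its rc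
          (its.foldl
            (fun r p =>
              if p.2 == f && decide ((r.length : Int) < rc)
              then PySem.Set.add r p.1 else r) rare) := by
  simp [pvSelFreqLoop, h, hm]

-- THE LOOP: selection over the remaining distinct frequencies produces exactly the
-- quota-truncated concatenation of the frequency groups in ascending order.
theorem pvSelFreqLoop_eq (its : List (Int × Int)) (hnd : (its.map (fun p => p.1)).Nodup)
    (rcN : Nat) (fuel : Nat) :
    ∀ (fs : List Int) (rare : List Int),
    fs.length ≤ fuel → fs.Nodup →
    (∀ p ∈ its, p.2 ∈ fs → p.1 ∉ rare) →
    rcN ≤ rare.length + ((PySem.List.sorted fs (fun k => k) false).flatMap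
        (fun f => its.filter (fun p => p.2 == f))).length →
    pvSelFreqLoop fuel fs its ((rcN : Nat) : Int) rare
      = rare ++ (((PySem.List.sorted fs (fun k => k) false).flatMap
          (fun f => its.filter (fun p => p.2 == f))).map (fun p => p.1)).take (rcN - rare.length) := by
  induction fuel with
  | zero =>
      intro fs rare hlen hndf hdisj hbound
      have : fs = [] := List.length_eq_zero_iff.mp (Nat.le_zero.mp hlen)
      subst this
      have hb' : rcN ≤ rare.length := by
        simpa [PySem.List.sorted] using hbound
      have : rcN - rare.length = 0 := by omega
      simp [pvSelFreqLoop, PySem.List.sorted, this]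
  | succ n ih =>
      intro fs rare hlen hndf hdisj hbound
      by_cases hfull : rare.length < rcN
      · have hdec : (decide ((rare.length : Int) < ((rcN : Nat) : Int))) = true := by
          simp only [decide_eq_true_eq]; exact_mod_cast hfull
        cases hm : PySem.List.min? fs (fun k => k) with
        | none =>
            have : fs = [] := (PySem.List.min?_eq_none_iff _ _).mp hm
            subst this
            simp [PySem.List.sorted] at hbound
            omega
        | some f =>
            have hfm : f ∈ fs := PySem.List.min?_mem hm
            have hsfs : PySem.List.sorted fs (fun k => k) false
                = f :: PySem.List.sorted (fs.erase f) (fun k => k) false :=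
              sorted_id_eq_min_cons fs f hm
            have hdiscard : PySem.Set.discard fs f = fs.erase f := by
              rw [List.Nodup.erase_eq_filter hndf]
              rfl
            have hndGf : ((its.filter (fun p => p.2 == f)).map (fun p => p.1)).Nodup :=
              (hnd.sublist (List.Sublist.map _ List.filter_sublist))
            have hdisjf : ∀ p ∈ its, p.2 = f → p.1 ∉ rare :=
              fun p hp hpf => hdisj p hp (hpf ▸ hfm)
            -- one step of the loop
            rw [pvSelFreqLoop_step n fs its _ rare f (by exact_mod_cast hfull) hm]
            rw [hdiscard, sweep_eq f rcN its rare hndGf hdisjf]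
            -- names for the pieces
            set Gf := (its.filter (fun p => p.2 == f)).map (fun p => p.1) with hGf
            set rest := (PySem.List.sorted (fs.erase f) (fun k => k) false).flatMap
                (fun f' => its.filter (fun p => p.2 == f')) with hrest
            have hflat : (PySem.List.sorted fs (fun k => k) false).flatMap
                (fun f' => its.filter (fun p => p.2 == f'))
                = its.filter (fun p => p.2 == f) ++ rest := by
              rw [hsfs, List.flatMap_cons]
            set rare' := rare ++ Gf.take (rcN - rare.length) with hrare'
            have hlen' : rare'.length = rare.length + min (rcN - rare.length) Gf.length := by
              simp [hrare', List.length_take]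
            have hdisj' : ∀ p ∈ its, p.2 ∈ fs.erase f → p.1 ∉ rare' := by
              intro p hp hpe
              have hpfs : p.2 ∈ fs := List.mem_of_mem_erase hpe
              have hpne : p.2 ≠ f := by
                intro hcontra
                exact (List.Nodup.not_mem_erase hndf) (hcontra ▸ hpe)
              simp only [hrare', List.mem_append]
              rintro (hin | hin)
              · exact hdisj p hp hpfs hin
              · have hin2 : p.1 ∈ Gf := List.mem_of_mem_take hin
                rcases List.mem_map.mp hin2 with ⟨q, hqf, hq1⟩
                have hq := List.mem_filter.mp hqf
                have : p = q := firsts_inj its hnd hp hq.1 hq1.symm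
                exact hpne (this ▸ beq_iff_eq.mp hq.2)
            have hbound' : rcN ≤ rare'.length + rest.length := by
              have h1 : rcN ≤ rare.length + ((its.filter (fun p => p.2 == f)).length
                  + rest.length) := by
                have := hbound
                rw [hflat] at this
                simpa [List.length_append] using this
              have h2 : Gf.length = (its.filter (fun p => p.2 == f)).length := by
                simp [hGf]
              omega
            rw [ih (fs.erase f) rare'
                (by have := List.length_erase_of_mem hfm; omega)
                (hndf.erase f) hdisj' hbound']
            -- assemble
            rw [hflat, List.map_append, List.take_append]
            have harith : List.take
                  (rcN - rare.length - ((its.filter (fun p => p.2 == f)).map (fun p => p.1)).length)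
                  (rest.map (fun p => p.1))
                = List.take (rcN - rare'.length) (rest.map (fun p => p.1)) := by
              have h2 : Gf.length = ((its.filter (fun p => p.2 == f)).map (fun p => p.1)).length := by
                simp [hGf]
              congr 1
              omega
            rw [harith, hrare']
            simp only [hGf, hrest, List.append_assoc]
      · rw [pvSelFreqLoop_stop n fs its _ rare (by exact_mod_cast hfull)]
        have : rcN - rare.length = 0 := by omega
        simp [this]

-- ===== VERDICT (by name: the statement is the Claim_ definition above) =====
theorem identify_rare_numbers_py_spec : Claim_equal_identify_rare_numbers_py := by
  intro xs _
  unfold Spec_identify_rare_numbers_py identify_rare_numbers_py identify_rare_numbers_py_alt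
  by_cases h : xs.isEmpty
  · simp [h]
  · simp only [h, Bool.false_eq_true, if_false]
    have hkeys : (PySem.Dict.counter xs).keys = (PySem.Dict.counter xs).items.map (fun p => p.1) := rfl
    have hndk : ((PySem.Dict.counter xs).items.map (fun p => p.1)).Nodup := by
      rw [← hkeys, PySem.Dict.keys_counter]
      exact PySem.Set.nodup_ofList xs
    have hk1 : 1 ≤ (PySem.Dict.counter xs).items.length := by
      cases xs with
      | nil => simp at h
      | cons y t =>
          have hy : y ∈ (PySem.Dict.counter (y :: t)).keys := by
            rw [PySem.Dict.keys_counter]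
            exact (PySem.Set.mem_ofList _ _).mpr (List.mem_cons_self ..)
          rw [hkeys] at hy
          have := List.length_pos_of_mem hy
          simpa using this
    set its := (PySem.Dict.counter xs).items with hits
    set k := its.length with hk
    set rcN : Nat := max 1 (k / 4) with hrcN
    have hkeyslen : (PySem.Dict.counter xs).keys.length = k := by
      rw [hkeys]; simp [hk]
    have hrcInt : max 1 (((PySem.Dict.counter xs).keys.length / 4 : Nat) : Int)
        = ((rcN : Nat) : Int) := by
      rw [hkeyslen, hrcN]
      simp [Nat.cast_max]
    have hslen : (PySem.List.sorted its (fun x => x.2) false).length = k :=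
      PySem.List.length_sorted ..
    have hgroups := sorted_snd_eq_flatMap_groups its
    have hvals : (PySem.Dict.counter xs).values = its.map (fun p => p.2) := rfl
    -- A side: slice is a take
    have hrc0 : (0 : Int) ≤ max 1 (((PySem.List.sorted its (fun x => x.2) false).length / 4 : Nat) : Int) :=
      le_trans zero_le_one (le_max_left _ _)
    have hAslice : PySem.List.slice (PySem.List.sorted its (fun x => x.2) false) none
          (some (max 1 (((PySem.List.sorted its (fun x => x.2) false).length / 4 : Nat) : Int)))
        = (PySem.List.sorted its (fun x => x.2) false).take rcN := by
      rw [PySem.List.slice_to _ hrc0, hslen]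
      congr 1
      omega
    rw [hAslice]
    -- B side: apply the loop lemma
    rw [hrcInt, hvals]
    have hbound : rcN ≤ ([] : List Int).length
        + ((PySem.List.sorted (PySem.Set.ofList (its.map (fun p => p.2))) (fun f => f) false).flatMap
            (fun f => its.filter (fun p => p.2 == f))).length := by
      rw [← hgroups, hslen]
      simp only [List.length_nil, Nat.zero_add, hrcN]
      have : k / 4 ≤ k := Nat.div_le_self _ _
      omega
    rw [show (PySem.Set.empty : PySem.Set Int) = ([] : List Int) from rfl]
    rw [pvSelFreqLoop_eq its hndk rcN (PySem.Set.ofList (its.map (fun p => p.2))).length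
        (PySem.Set.ofList (its.map (fun p => p.2))) [] (le_refl _)
        (PySem.Set.nodup_ofList _) (by simp) hbound]
    rw [← hgroups]
    -- both sides are the same take of the same map
    have hmapnd : ((PySem.List.sorted its (fun x => x.2) false).map (fun p => p.1)).Nodup := by
      have hperm : ((PySem.List.sorted its (fun x => x.2) false).map (fun p => p.1)).Perm
          (its.map (fun p => p.1)) := (PySem.List.sorted_perm its _ false).map _
      exact hperm.nodup_iff.mpr hndk
    have htake : (((PySem.List.sorted its (fun x => x.2) false).take rcN).map (fun p => p.1))
        = ((PySem.List.sorted its (fun x => x.2) false).map (fun p => p.1)).take rcN := by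
      rw [List.map_take]
    rw [htake, ofList_eq_self_of_nodup _ (hmapnd.sublist (List.take_sublist ..))]
    simp
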